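-- pv_equiv track=rewrite | github.com/dreamhunteryin/hpc_ibsafe_cbd_v1 | slurm/schedule_prepare_cbd_easy_masks.py | build_clip_ranges
-- ===== SOURCE A (Python) =====
-- def build_clip_ranges(total_records: int, num_workers: int) -> list[tuple[int, int]]:
--     if num_workers < 1:
--         raise ValueError("--num-workers must be at least 1.")
--     if total_records < 0:
--         raise ValueError("total_records must be non-negative.")
--     base, remainder = divmod(total_records, num_workers)
--     ranges: list[tuple[int, int]] = []
--     start = 0
--     for worker_index in range(num_workers):
--         size = base + (1 if worker_index < remainder else 0)
--         end = start + size
--         ranges.append((start, end))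
--         start = end
--     return ranges
-- ===== SOURCE B (Python) =====
-- def build_clip_ranges(total_records: int, num_workers: int) -> list[tuple[int, int]]:
--     if num_workers < 1:
--         raise ValueError("--num-workers must be at least 1.")
--     if total_records < 0:
--         raise ValueError("total_records must be non-negative.")
--     base, remainder = divmod(total_records, num_workers)
--
--     def boundary(i: int) -> int:
--         # closed form: the first `remainder` workers get base+1 records each
--         return i * base + min(i, remainder)
--
--     return [(boundary(i), boundary(i + 1)) for i in range(num_workers)]
-- ===== Notes on version B (the rewrite author's own statement) =====
-- stated objective: alternative
-- what changed: Replaced the sequential running-start accumulator with a closed-form boundary formula boundary(i) = i*base + min(i, remainder), computing each worker's range independently with no carried state.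
import Mathlib
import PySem

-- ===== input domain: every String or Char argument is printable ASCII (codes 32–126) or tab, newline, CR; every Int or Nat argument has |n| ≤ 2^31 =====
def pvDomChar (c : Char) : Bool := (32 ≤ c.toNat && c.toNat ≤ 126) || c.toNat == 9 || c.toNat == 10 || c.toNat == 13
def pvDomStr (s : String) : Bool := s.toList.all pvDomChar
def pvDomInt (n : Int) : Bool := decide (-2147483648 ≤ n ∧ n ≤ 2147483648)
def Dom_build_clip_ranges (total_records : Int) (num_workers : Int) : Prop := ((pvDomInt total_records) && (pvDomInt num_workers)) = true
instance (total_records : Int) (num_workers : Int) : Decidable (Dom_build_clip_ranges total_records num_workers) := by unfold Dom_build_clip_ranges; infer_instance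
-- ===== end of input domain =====

-- B replaces A's running-start accumulator loop by a closed-form boundary formula i*base + min(i, remainder), computing each range independently; alternative decomposition, same cost.


-- ===== PORT A =====
-- A raises ValueError when num_workers < 1 or total_records < 0; those inputs are outside Pre_ and the port returns [] there.
def build_clip_ranges (total_records : Int) (num_workers : Int) : List (Int × Int) :=
  if num_workers < 1 then []
  else if total_records < 0 then []
  else
    let base := PySem.Int.floordiv total_records num_workers
    let remainder := PySem.Int.mod total_records num_workers
    let st := (PySem.List.pyRange 0 num_workers 1).foldl
      (fun (st : List (Int × Int) × Int) worker_index =>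
        let size := base + (if worker_index < remainder then 1 else 0)
        let e := st.2 + size
        (st.1 ++ [(st.2, e)], e)) ([], 0)
    st.1

-- ===== PORT B =====
def build_clip_ranges_alt (total_records : Int) (num_workers : Int) : List (Int × Int) :=
  if num_workers < 1 then []
  else if total_records < 0 then []
  else
    let base := PySem.Int.floordiv total_records num_workers
    let remainder := PySem.Int.mod total_records num_workers
    let boundary := fun (i : Int) => i * base + min i remainder
    (PySem.List.pyRange 0 num_workers 1).map (fun i => (boundary i, boundary (i + 1)))

-- ===== PRECONDITION & SPEC =====
-- Pre_ excludes exactly the inputs on which A raises ValueError.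
def Pre_build_clip_ranges (total_records : Int) (num_workers : Int) : Prop :=
  1 ≤ num_workers ∧ 0 ≤ total_records
instance (total_records : Int) (num_workers : Int) : Decidable (Pre_build_clip_ranges total_records num_workers) := by unfold Pre_build_clip_ranges; infer_instance
def pvWitness_build_clip_ranges : Int × Int := (10, 3)

def Spec_build_clip_ranges (total_records : Int) (num_workers : Int) (out : List (Int × Int)) : Prop := out = build_clip_ranges_alt total_records num_workers
instance (total_records : Int) (num_workers : Int) (out : List (Int × Int)) : Decidable (Spec_build_clip_ranges total_records num_workers out) := by unfold Spec_build_clip_ranges; infer_instance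

-- ===== CLAIM (what is proved, stated in full; the proofs are below) =====
def Claim_equal_build_clip_ranges : Prop := ∀ (total_records : Int) (num_workers : Int), Dom_build_clip_ranges total_records num_workers → Pre_build_clip_ranges total_records num_workers → Spec_build_clip_ranges total_records num_workers (build_clip_ranges total_records num_workers)

-- ===== LEMMAS AND PROOFS =====

-- boundary(i+1) = boundary(i) + size(i)
theorem pv_bnd_succ (base r i : Int) :
    (i + 1) * base + min (i + 1) r
      = (i * base + min i r) + (base + (if i < r then 1 else 0)) := by
  have h : (i + 1) * base = i * base + base := by ring
  rw [h]; split_ifs with hi <;> omega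

-- A's accumulator fold over range(m) produces exactly B's closed-form list, with final start = boundary m.
theorem pv_fold_closed (base r : Int) (hr0 : 0 ≤ r) : ∀ (m : Nat),
    ((PySem.List.pyRange 0 (m : Int) 1).foldl
      (fun (st : List (Int × Int) × Int) i =>
        let size := base + (if i < r then 1 else 0)
        let e := st.2 + size
        (st.1 ++ [(st.2, e)], e)) ([], 0))
    = ((PySem.List.pyRange 0 (m : Int) 1).map
        (fun i => (i * base + min i r, (i + 1) * base + min (i + 1) r)),
       (m : Int) * base + min (m : Int) r) := by
  intro m
  induction m with
  | zero => simpa [PySem.List.pyRange_one_eq_nil] using hr0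
  | succ k ih =>
    have hk : (0 : Int) ≤ (k : Int) := by positivity
    have hr : PySem.List.pyRange 0 ((k : Int) + 1) 1
        = PySem.List.pyRange 0 (k : Int) 1 ++ [(k : Int)] :=
      PySem.List.pyRange_one_succ_right hk
    push_cast
    rw [hr, List.foldl_append, List.map_append, ih]
    simp only [List.foldl_cons, List.foldl_nil, List.map_cons, List.map_nil]
    refine Prod.ext ?_ ?_
    · simp [pv_bnd_succ base r (k : Int)]
    · simp [pv_bnd_succ base r (k : Int)]

-- ===== VERDICT (by name: the statement is the Claim_ definition above) =====
theorem build_clip_ranges_spec : Claim_equal_build_clip_ranges := by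
  intro t n _ hpre
  unfold Spec_build_clip_ranges build_clip_ranges build_clip_ranges_alt
  obtain ⟨h1, h2⟩ := hpre
  rw [if_neg (by omega), if_neg (by omega), if_neg (by omega), if_neg (by omega)]
  obtain ⟨m, hm⟩ : ∃ m : Nat, n = (m : Int) := ⟨n.toNat, by omega⟩
  subst hm
  have hr0 : 0 ≤ PySem.Int.mod t (m : Int) := PySem.Int.mod_nonneg t (by omega)
  exact congrArg Prod.fst
    (pv_fold_closed (PySem.Int.floordiv t (m : Int)) (PySem.Int.mod t (m : Int)) hr0 m)
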